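-- pv_equiv track=rewrite | github.com/cgxuvector/ml_nav | utils/mapper.py | rotate_compass
-- ===== SOURCE A (Python) =====
-- def rotate_compass(compass, act):
--     """
--     Function is used to rotate the current compass after executing the last action using the current compass
--     :param compass: current compass (relative egocentric)
--     :param act: last action in current compass
--     :return: rotated compass
--     """
--     # This is a local compass
--     # action in the current compass
--     default_compass = ["up", 'right', 'down', 'left']
--     # compute the rotate steps
--     rotate_step = default_compass.index(act)
--     # achieve the rotation using circle
--     while rotate_step > 0:
--         head = compass.pop()
--         compass.insert(0, head)
--         rotate_step -= 1
--     return compass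
-- ===== SOURCE B (Python) =====
-- def rotate_compass(compass, act):
--     """Rotate compass right by the index of act, in one slice reassembly (in place)."""
--     default_compass = ["up", 'right', 'down', 'left']
--     step = default_compass.index(act)
--     n = len(compass)
--     if n:
--         step %= n
--         compass[:] = compass[-step:] + compass[:-step]
--     return compass
-- ===== Notes on version B (the rewrite author's own statement) =====
-- stated objective: simpler
-- what changed: A rotates by repeatedly popping the last element and re-inserting it at index 0, rotate_step times; B computes step = index(act) once, reduces it modulo len(compass), and rebuilds the list in one in-place slice reassembly compass[:] = compass[-step:] + compass[:-step].
import Mathlib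
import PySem

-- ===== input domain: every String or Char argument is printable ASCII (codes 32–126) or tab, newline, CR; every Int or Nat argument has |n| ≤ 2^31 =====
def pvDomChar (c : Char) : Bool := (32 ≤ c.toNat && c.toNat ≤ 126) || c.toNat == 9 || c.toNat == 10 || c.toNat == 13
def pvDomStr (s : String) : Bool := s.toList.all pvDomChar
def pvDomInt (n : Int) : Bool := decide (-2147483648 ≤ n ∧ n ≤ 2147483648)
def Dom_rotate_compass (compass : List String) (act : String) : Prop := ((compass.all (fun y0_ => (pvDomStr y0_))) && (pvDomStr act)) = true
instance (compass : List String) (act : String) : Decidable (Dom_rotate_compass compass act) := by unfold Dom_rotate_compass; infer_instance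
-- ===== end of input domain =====

-- B replaces A's one-element-at-a-time pop/insert rotation loop with a single
-- modular split-and-reassemble of two slices (objective: simpler). Both A and B
-- mutate `compass` in place in Python; the equivalence proved here is about the
-- return value (which is the same mutated list object in both).

-- ===== PORT A =====
-- the while loop: pop the last element, re-insert it at position 0, rotate_step times
def rcLoop : Nat → List String → List String
  | 0, c => c
  | k + 1, c =>
    match PySem.List.pop? c with            -- compass.pop()  (IndexError → none, excluded by Pre_)
    | none => []
    | some (head, rest) => rcLoop k (PySem.List.insert rest 0 head)   -- compass.insert(0, head)

def rotate_compass (compass : List String) (act : String) : List String :=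
  match PySem.List.index? ["up", "right", "down", "left"] act with    -- default_compass.index(act)
  | none => []                              -- ValueError (excluded by Pre_)
  | some step => rcLoop step compass

-- ===== PORT B =====
def rotB (step : Nat) (compass : List String) : List String :=
  let n := compass.length
  if n ≠ 0 then
    let s := PySem.Int.mod (step : Int) (n : Int)                     -- step %= n
    PySem.List.slice compass (some (-s)) none ++ PySem.List.slice compass none (some (-s))
  else compass

def rotate_compass_alt (compass : List String) (act : String) : List String :=
  match PySem.List.index? ["up", "right", "down", "left"] act with
  | none => []                              -- ValueError (excluded by Pre_)
  | some step => rotB step compass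

-- ===== PRECONDITION & SPEC =====
-- Pre_ excludes exactly where A raises: ValueError when act is not one of the four
-- compass directions, and IndexError (pop from empty list) when compass is empty
-- and the rotation step is positive (act ≠ "up").
def Pre_rotate_compass (compass : List String) (act : String) : Prop :=
  act ∈ (["up", "right", "down", "left"] : List String) ∧ (compass ≠ [] ∨ act = "up")
instance (compass : List String) (act : String) : Decidable (Pre_rotate_compass compass act) := by
  unfold Pre_rotate_compass; infer_instance

def pvWitness_rotate_compass : List String × String := (["a", "b", "c"], "right")

def Spec_rotate_compass (compass : List String) (act : String) (out : List String) : Prop :=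
  out = rotate_compass_alt compass act
instance (compass : List String) (act : String) (out : List String) : Decidable (Spec_rotate_compass compass act out) := by
  unfold Spec_rotate_compass; infer_instance

-- ===== CLAIM (what is proved, stated in full; the proofs are below) =====
def Claim_equal_rotate_compass : Prop := ∀ (compass : List String) (act : String), Dom_rotate_compass compass act → Pre_rotate_compass compass act → Spec_rotate_compass compass act (rotate_compass compass act)

-- ===== LEMMAS AND PROOFS =====

-- one pass of the while body is a right-rotation by one, i.e. a left rotation by length - 1
theorem rcLoop_succ (k : Nat) (c : List String) (hc : c ≠ []) :
    rcLoop (k + 1) c = rcLoop k (c.rotate (c.length - 1)) := by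
  rcases List.eq_nil_or_concat c with rfl | ⟨l, x, rfl⟩
  · exact absurd rfl hc
  · rw [List.concat_eq_append] at *
    rw [rcLoop, PySem.List.pop?_last]
    dsimp only
    rw [PySem.List.insert_zero]
    congr 1
    have hlen : (l ++ [x]).length - 1 = l.length := by simp
    rw [hlen, List.rotate_eq_drop_append_take (by simp), List.drop_left, List.take_left]
    rfl

theorem rcLoop_eq_rotate (k : Nat) (c : List String) (hc : c ≠ []) :
    rcLoop k c = c.rotate (k * (c.length - 1)) := by
  induction k generalizing c with
  | zero => simp [rcLoop]
  | succ k ih =>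
    rw [rcLoop_succ k c hc, ih _ (by simp [hc])]
    rw [List.length_rotate, List.rotate_rotate]
    congr 1
    ring
-- the modular-arithmetic core: rotating left k*(n-1) ≡ n - k % n (mod n)
theorem rot_mod_core (s n : Nat) (h1 : 1 ≤ s) (h2 : s < n) :
    (s * (n - 1)) % n = (n - s) % n := by
  obtain ⟨t, rfl⟩ : ∃ t, s = t + 1 := ⟨s - 1, by omega⟩
  obtain ⟨m, rfl⟩ : ∃ m, n = (t + 1) + (m + 1) := ⟨n - t - 2, by omega⟩
  have e1 : (t + 1) * ((t + 1) + (m + 1) - 1) = (m + 1) + t * ((t + 1) + (m + 1)) := by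
    have : (t + 1) + (m + 1) - 1 = t + m + 1 := by omega
    rw [this]; ring
  have e2 : (t + 1) + (m + 1) - (t + 1) = m + 1 := by omega
  rw [e1, e2, Nat.add_mul_mod_self_right]

theorem rot_mod_key (k n : Nat) (hn : 1 ≤ n) :
    (k * (n - 1)) % n = (n - k % n) % n := by
  have hk : k % n ≡ k [MOD n] := Nat.mod_modEq k n
  have h2 : k * (n - 1) ≡ (k % n) * (n - 1) [MOD n] := (hk.mul_right (n - 1)).symm
  rw [Nat.ModEq] at h2
  rw [h2]
  have hslt : k % n < n := Nat.mod_lt _ (by omega)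
  rcases Nat.eq_zero_or_pos (k % n) with h0 | hpos
  · simp [h0]
  · exact rot_mod_core (k % n) n hpos hslt

-- main lemma: the pop/insert loop equals the slice reassembly
theorem rcLoop_eq_rotB (step : Nat) (c : List String) (h : c ≠ [] ∨ step = 0) :
    rcLoop step c = rotB step c := by
  by_cases hc : c = []
  · rcases h with h | h
    · exact absurd hc h
    · subst h; subst hc; rfl
  · have hn : 1 ≤ c.length := List.length_pos_iff.mpr hc
    rw [rcLoop_eq_rotate step c hc]
    unfold rotB
    simp only [Ne]
    rw [if_pos (by omega), PySem.Int.mod_natCast]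
    set s := step % c.length with hs
    rcases Nat.eq_zero_or_pos s with h0 | hpos
    · -- step % n = 0 : B leaves the list unchanged, A rotates by a multiple of n
      rw [h0]
      have hb1 : PySem.List.slice c (some (-((0 : Nat) : Int))) none = c := by
        simp [PySem.List.slice_some_none]
      have hb2 : PySem.List.slice c none (some (-((0 : Nat) : Int))) = ([] : List String) := by
        have : (-((0 : Nat) : Int)) = (0 : Int) := by norm_num
        rw [this, PySem.List.slice_to c (by norm_num)]
        simp
      rw [hb1, hb2, List.append_nil]
      rw [← List.rotate_mod, rot_mod_key step c.length hn, ← hs, h0]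
      simp [Nat.mod_self]
    · -- 1 ≤ step % n < n : both sides are a left rotation by n - step % n
      rw [PySem.List.slice_from_neg_natCast c s hpos, PySem.List.slice_to_neg_natCast c s hpos]
      have hslt : s < c.length := Nat.mod_lt _ (by omega)
      rw [← List.rotate_eq_drop_append_take (by omega)]
      rw [← List.rotate_mod, rot_mod_key step c.length hn, ← hs]
      rw [List.rotate_mod]

-- ===== VERDICT (by name: the statement is the Claim_ definition above) =====
theorem rotate_compass_spec : Claim_equal_rotate_compass := by
  intro compass act _ hpre
  obtain ⟨hmem, hne⟩ := hpre
  show rotate_compass compass act = rotate_compass_alt compass act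
  fin_cases hmem
  · -- "up" : step = 0
    show rcLoop 0 compass = rotB 0 compass
    exact rcLoop_eq_rotB 0 compass (Or.inr rfl)
  · show rcLoop 1 compass = rotB 1 compass
    refine rcLoop_eq_rotB 1 compass (Or.inl ?_)
    rcases hne with h | h
    · exact h
    · exact absurd h (by decide)
  · show rcLoop 2 compass = rotB 2 compass
    refine rcLoop_eq_rotB 2 compass (Or.inl ?_)
    rcases hne with h | h
    · exact h
    · exact absurd h (by decide)
  · show rcLoop 3 compass = rotB 3 compass
    refine rcLoop_eq_rotB 3 compass (Or.inl ?_)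
    rcases hne with h | h
    · exact h
    · exact absurd h (by decide)
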